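-- pv_equiv track=rewrite | github.com/sunoftwilight/Algorithm | 프로그래머스/1/81301. 숫자 문자열과 영단어/숫자 문자열과 영단어.py | solution
-- ===== SOURCE A (Python) =====
-- def solution(s):
--     num_dict = {
--         'zero': '0',
--         'one': '1',
--         'two': '2',
--         'three': '3',
--         'four': '4',
--         'five': '5',
--         'six': '6',
--         'seven': '7',
--         'eight': '8',
--         'nine': '9',
--     }
--
--     num_list = ['0', '1', '2', '3', '4', '5', '6', '7', '8', '9']
--
--     answer = ''
--
--     idx = 0
--
--     while idx < len(s):
--         tmp = idx
--
--         while s[tmp] not in num_list: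
--             tmp += 1
--
--             if num_dict.get(s[idx : tmp]):
--                 # answer += num_dict[s[idx : tmp]]
--                 break
--
--         if tmp - idx > 1:
--             answer += num_dict[s[idx: tmp]]
--             idx = tmp
--
--         else:
--             answer += s[idx]
--             idx += 1
--
--     return int(answer)
-- ===== SOURCE B (Python) =====
-- def solution(s):
--     num_dict = {
--         'zero': '0', 'one': '1', 'two': '2', 'three': '3', 'four': '4',
--         'five': '5', 'six': '6', 'seven': '7', 'eight': '8', 'nine': '9',
--     }
--     for word, digit in num_dict.items():
--         s = s.replace(word, digit)
--     return int(s)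
-- ===== Notes on version B (the rewrite author's own statement) =====
-- stated objective: faster
-- what changed: Instead of scanning character positions with nested index loops and probing the dict on every growing slice, B performs one global str.replace per number word and lets int() parse the fully digitized string.
-- outside the precondition, e.g. on solution(' 12'): A returns 12, B returns 12; on solution('+5'): A returns 5, B returns 5
import Mathlib
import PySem

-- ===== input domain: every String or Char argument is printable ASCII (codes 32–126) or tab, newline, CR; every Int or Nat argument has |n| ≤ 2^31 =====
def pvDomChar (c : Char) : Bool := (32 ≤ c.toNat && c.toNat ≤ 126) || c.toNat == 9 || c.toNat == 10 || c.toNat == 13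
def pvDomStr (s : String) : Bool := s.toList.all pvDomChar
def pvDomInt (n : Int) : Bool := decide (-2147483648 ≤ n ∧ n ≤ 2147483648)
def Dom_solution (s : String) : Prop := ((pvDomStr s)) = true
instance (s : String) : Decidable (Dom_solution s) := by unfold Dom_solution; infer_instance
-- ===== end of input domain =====

-- B replaces A's per-character index scanning (incremental slice + dict probe) by one global
-- str.replace per number word followed by int(); intended as a constant-factor speedup.

-- ===== PORT A =====
-- num_dict from the source (str keys/values as their character lists)
def pvNumDict : PySem.Dict (List Char) (List Char) := PySem.Dict.mk
  [ (['z','e','r','o'], ['0']), (['o','n','e'], ['1']), (['t','w','o'], ['2']),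
    (['t','h','r','e','e'], ['3']), (['f','o','u','r'], ['4']), (['f','i','v','e'], ['5']),
    (['s','i','x'], ['6']), (['s','e','v','e','n'], ['7']), (['e','i','g','h','t'], ['8']),
    (['n','i','n','e'], ['9']) ]

def pvNumList : List Char := ['0', '1', '2', '3', '4', '5', '6', '7', '8', '9']

-- the inner `while s[tmp] not in num_list:` loop; returns the final tmp; none = IndexError at s[tmp]
def pvInnerA (s : List Char) (idx tmp : Nat) : Option Nat :=
  if h : tmp < s.length then
    if pvNumList.contains s[tmp] then some tmp
    else
      if (pvNumDict.get? (PySem.List.slice s (some (idx : Int)) (some ((tmp + 1 : Nat) : Int)))).isSome then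
        some (tmp + 1)                 -- `if num_dict.get(s[idx:tmp]): break` (all dict values are truthy)
      else pvInnerA s idx (tmp + 1)
  else none
termination_by s.length - tmp
decreasing_by omega

-- the outer `while idx < len(s):` loop, carrying `answer`; none = IndexError/KeyError inside the body
def pvOuterA (s : List Char) (idx : Nat) (answer : List Char) : Option (List Char) :=
  if h : idx < s.length then
    match pvInnerA s idx idx with
    | none => none
    | some tmp =>
      if tmp - idx > 1 then
        match pvNumDict.get? (PySem.List.slice s (some (idx : Int)) (some ((tmp : Nat) : Int))) with
        | some v => pvOuterA s tmp (answer ++ v)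
        | none => none                 -- KeyError on num_dict[s[idx:tmp]]
      else pvOuterA s (idx + 1) (answer ++ [s[idx]])
  else some answer
termination_by s.length - idx
decreasing_by all_goals omega

def solution (s : String) : Int :=
  match pvOuterA s.toList 0 [] with
  | some answer => (PySem.Int.ofChars? answer).getD 0   -- int(answer); none = ValueError, excluded by Pre_
  | none => 0                                           -- exception inside the loop, excluded by Pre_

-- ===== PORT B =====
-- num_dict.items() of Source B, in insertion order
def pvItemsB : List (List Char × List Char) :=
  [ (['z','e','r','o'], ['0']), (['o','n','e'], ['1']), (['t','w','o'], ['2']),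
    (['t','h','r','e','e'], ['3']), (['f','o','u','r'], ['4']), (['f','i','v','e'], ['5']),
    (['s','i','x'], ['6']), (['s','e','v','e','n'], ['7']), (['e','i','g','h','t'], ['8']),
    (['n','i','n','e'], ['9']) ]

def solution_alt (s : String) : Int :=
  let t := pvItemsB.foldl (fun t p => PySem.Chars.replace t p.1 p.2) s.toList
  (PySem.Int.ofChars? t).getD 0        -- int(s); none = ValueError, excluded by Pre_

-- ===== PRECONDITION & SPEC =====
-- the ten number words, for the domain description
def pvWordsP : List (List Char) :=
  [ ['z','e','r','o'], ['o','n','e'], ['t','w','o'], ['t','h','r','e','e'], ['f','o','u','r'],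
    ['f','i','v','e'], ['s','i','x'], ['s','e','v','e','n'], ['e','i','g','h','t'], ['n','i','n','e'] ]

-- positions reachable from i in one token step (a digit character or a number word)
def pvStepsAt (cs : List Char) (i : Nat) : List Nat :=
  ((pvWordsP.filter (fun w => w.isPrefixOf (cs.drop i))).map (fun w => i + w.length)) ++
  (match cs.drop i with
   | c :: _ => if c.isDigit then [i + 1] else []
   | [] => [])

-- all positions of cs reachable from 0 by token steps
def pvReach (cs : List Char) : List Nat :=
  (List.range cs.length).foldl (fun acc i => if acc.contains i then acc ++ pvStepsAt cs i else acc) [0]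

-- Pre_: s is a nonempty concatenation of decimal digits and the ten English number words (stated as:
-- position len(s) is reachable from 0 stepping over digit/word tokens) — the task's intended domain.
-- Outside it A raises (IndexError/KeyError/ValueError), except that int()'s lenient parsing lets A
-- accidentally return on strings with stray characters such as ' 12' or '+5' (B returns the same there).
def Pre_solution (s : String) : Prop :=
  s.toList ≠ [] ∧ (pvReach s.toList).contains s.toList.length = true

instance (s : String) : Decidable (Pre_solution s) := by unfold Pre_solution; infer_instance

def pvWitness_solution : String := "one4seven"

def Spec_solution (s : String) (out : Int) : Prop := out = solution_alt s
instance (s : String) (out : Int) : Decidable (Spec_solution s out) := by unfold Spec_solution; infer_instance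

-- ===== CLAIM (what is proved, stated in full; the proofs are below) =====
def Claim_equal_solution : Prop := ∀ (s : String), Dom_solution s → Pre_solution s → Spec_solution s (solution s)

-- ===== LEMMAS AND PROOFS =====

-- Token view used by the proofs: a token is a digit character (inl) or the index of a number word (inr).
def pvPairs : List (List Char × Char) :=
  [ (['z','e','r','o'], '0'), (['o','n','e'], '1'), (['t','w','o'], '2'),
    (['t','h','r','e','e'], '3'), (['f','o','u','r'], '4'), (['f','i','v','e'], '5'),
    (['s','i','x'], '6'), (['s','e','v','e','n'], '7'), (['e','i','g','h','t'], '8'),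
    (['n','i','n','e'], '9') ]

def pvW (i : Nat) : List Char := (pvPairs.getD i ([], ' ')).1
def pvD (i : Nat) : Char := (pvPairs.getD i ([], ' ')).2

def pvOkT : Char ⊕ Nat → Prop
  | .inl c => c.isDigit = true
  | .inr i => i < 10

-- rendering after the first k words have been replaced by their digits
def pvRend (k : Nat) : Char ⊕ Nat → List Char
  | .inl c => [c]
  | .inr i => if i < k then [pvD i] else pvW i

def pvStr (k : Nat) (T : List (Char ⊕ Nat)) : List Char := (T.map (pvRend k)).flatten

-- finite facts about the ten concrete words, discharged by decide
theorem pvF_len : ∀ i < 10, 3 ≤ (pvW i).length := by decide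
theorem pvF_digit : ∀ i < 10, (pvD i).isDigit = true := by decide
set_option maxRecDepth 8192 in
theorem pvF_noinf : ∀ k < 10, ∀ i < 10, i ≠ k → ∀ j < (pvW i).length,
    ¬ (pvW k).isPrefixOf ((pvW i).drop j) := by decide
set_option maxRecDepth 8192 in
theorem pvF_q1 : ∀ k < 10, ∀ i < 10, i ≠ k → ∀ j < (pvW i).length,
    ((pvW i).drop j).isPrefixOf (pvW k) →
      (pvW k).drop ((pvW i).drop j).length ≠ [] := by decide
set_option maxRecDepth 8192 in
theorem pvF_q2 : ∀ k < 10, ∀ i < 10, i ≠ k → ∀ j < (pvW i).length,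
    ((pvW i).drop j).isPrefixOf (pvW k) →
      (((pvW k).drop ((pvW i).drop j).length).headD 'x').isDigit = false := by decide
set_option maxRecDepth 8192 in
theorem pvF_q3Bool : ((List.range 10).all fun k => (List.range 10).all fun i =>
    (List.range (pvW i).length).all fun j => (List.range 10).all fun m =>
      !(decide (i ≠ k) && ((pvW i).drop j).isPrefixOf (pvW k) &&
        decide (((pvW k).drop ((pvW i).drop j).length).length ≤ (pvW m).length) &&
        ((pvW k).drop ((pvW i).drop j).length).isPrefixOf (pvW m))) = true := by decide

set_option maxRecDepth 8192 in
theorem pvF_q4Bool : ((List.range 10).all fun k => (List.range 10).all fun i =>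
    (List.range (pvW i).length).all fun j => (List.range 10).all fun m =>
      !(decide (i ≠ k) && ((pvW i).drop j).isPrefixOf (pvW k) &&
        decide ((pvW m).length < ((pvW k).drop ((pvW i).drop j).length).length) &&
        (pvW m).isPrefixOf ((pvW k).drop ((pvW i).drop j).length))) = true := by decide

theorem pvF_q3 (k i j m : Nat) (hk : k < 10) (hi : i < 10) (hj : j < (pvW i).length) (hm : m < 10)
    (hne : i ≠ k) (hp : ((pvW i).drop j).isPrefixOf (pvW k) = true)
    (hl : ((pvW k).drop ((pvW i).drop j).length).length ≤ (pvW m).length) :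
    ¬ ((pvW k).drop ((pvW i).drop j).length).isPrefixOf (pvW m) = true := by
  intro hc
  have h := pvF_q3Bool
  rw [List.all_eq_true] at h
  have h := h k (List.mem_range.mpr hk); rw [List.all_eq_true] at h
  have h := h i (List.mem_range.mpr hi); rw [List.all_eq_true] at h
  have h := h j (List.mem_range.mpr hj); rw [List.all_eq_true] at h
  have h := h m (List.mem_range.mpr hm)
  rw [hp, hc, decide_eq_true hne, decide_eq_true hl] at h
  simp at h

theorem pvF_q4 (k i j m : Nat) (hk : k < 10) (hi : i < 10) (hj : j < (pvW i).length) (hm : m < 10)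
    (hne : i ≠ k) (hp : ((pvW i).drop j).isPrefixOf (pvW k) = true)
    (hl : (pvW m).length < ((pvW k).drop ((pvW i).drop j).length).length) :
    ¬ (pvW m).isPrefixOf ((pvW k).drop ((pvW i).drop j).length) = true := by
  intro hc
  have h := pvF_q4Bool
  rw [List.all_eq_true] at h
  have h := h k (List.mem_range.mpr hk); rw [List.all_eq_true] at h
  have h := h i (List.mem_range.mpr hi); rw [List.all_eq_true] at h
  have h := h j (List.mem_range.mpr hj); rw [List.all_eq_true] at h
  have h := h m (List.mem_range.mpr hm)
  rw [hp, hc, decide_eq_true hne, decide_eq_true hl] at h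
  simp at h

-- clean (fuel-free) form of PySem.Chars.replace for a nonempty pattern
def pvRep (old new : List Char) : List Char → List Char
  | [] => []
  | c :: t =>
    if old ≠ [] ∧ old.isPrefixOf (c :: t) then new ++ pvRep old new (List.drop old.length (c :: t))
    else c :: pvRep old new t
termination_by l => l.length
decreasing_by
  · rename_i h; have := h.1
    have : 1 ≤ old.length := by cases old with | nil => simp at this | cons a b => simp
    simp [List.length_drop]; omega
  · simp

theorem pv_go_eq (old new : List Char) (hold : old ≠ []) :
    ∀ fuel (l acc : List Char), l.length ≤ fuel →
      PySem.Chars.replace.go old new fuel l acc = acc.reverse ++ pvRep old new l := by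
  intro fuel
  induction fuel with
  | zero =>
    intro l acc hl
    have : l = [] := by cases l <;> simp_all
    subst this
    simp [PySem.Chars.replace.go, pvRep]
  | succ n ih =>
    intro l acc hl
    cases l with
    | nil => simp [PySem.Chars.replace.go, pvRep]
    | cons c t =>
      rw [PySem.Chars.replace.go]
      by_cases hp : old.isPrefixOf (c :: t)
      · have h1 : 1 ≤ old.length := by cases old with | nil => simp at hold | cons a b => simp
        rw [if_pos hp, ih _ _ (by simp [List.length_drop]; simp at hl; omega)]
        rw [pvRep, if_pos ⟨hold, hp⟩]
        simp
      · rw [if_neg hp, ih _ _ (by simp at hl; omega)]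
        rw [pvRep, if_neg (by simp [hp])]
        simp

theorem pv_replace_eq_rep (s old new : List Char) (hold : old ≠ []) :
    PySem.Chars.replace s old new = pvRep old new s := by
  unfold PySem.Chars.replace
  rw [if_neg (by simpa using hold)]
  simpa using pv_go_eq old new hold s.length s [] (le_refl _)

theorem pv_rep_peel (old new : List Char) : ∀ (p X : List Char),
    (∀ j < p.length, ¬ old.isPrefixOf (p.drop j ++ X)) →
    pvRep old new (p ++ X) = p ++ pvRep old new X := by
  intro p
  induction p with
  | nil => intro X _; simp
  | cons c p' ih =>
    intro X hp
    have h0 : ¬ old.isPrefixOf (c :: (p' ++ X)) := by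
      have := hp 0 (by simp)
      simpa using this
    rw [List.cons_append, pvRep, if_neg (by simp [h0])]
    rw [ih X (fun j hj => by have := hp (j+1) (by simp; omega); simpa using this)]
    simp

theorem pv_prefix_left {p a b : List Char} (h : p <+: a ++ b) (hl : p.length ≤ a.length) : p <+: a := by
  rcases (List.prefix_or_prefix_of_prefix h (List.prefix_append a b)) with h1 | h1
  · exact h1
  · exact (List.IsPrefix.eq_of_length_le h1 hl) ▸ List.prefix_refl _

theorem pv_prefix_swap {p a b : List Char} (h : p <+: a ++ b) (hl : a.length ≤ p.length) : a <+: p := by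
  rcases (List.prefix_or_prefix_of_prefix h (List.prefix_append a b)) with h1 | h1
  · exact (List.IsPrefix.eq_of_length_le h1 hl) ▸ List.prefix_refl _
  · exact h1

theorem pv_no_q_prefix (q : List Char) (hq : q ≠ [])
    (hqd : (q.headD 'x').isDigit = false)
    (hw : ∀ m < 10, (q.length ≤ (pvW m).length → ¬ q <+: pvW m) ∧ ((pvW m).length < q.length → ¬ pvW m <+: q))
    (k : Nat) (T : List (Char ⊕ Nat)) (hT : ∀ t ∈ T, pvOkT t) :
    ¬ q <+: pvStr k T := by
  cases T with
  | nil => intro h; exact hq (List.prefix_nil.mp (by simpa [pvStr] using h))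
  | cons t T' =>
    intro h
    have hstr : pvStr k (t :: T') = pvRend k t ++ pvStr k T' := by simp [pvStr]
    rw [hstr] at h
    obtain ⟨qc, q', rfl⟩ : ∃ qc q', q = qc :: q' := by
      cases q with | nil => simp at hq | cons a b => exact ⟨a, b, rfl⟩
    have hqc : qc.isDigit = false := by simpa using hqd
    cases t with
    | inl c =>
      have hc : c.isDigit = true := by simpa [pvOkT] using hT _ (List.mem_cons_self ..)
      have h' : qc :: q' <+: c :: pvStr k T' := by simpa [pvRend] using h
      rw [List.cons_prefix_cons] at h'
      rw [h'.1] at hqc; simp [hc] at hqc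
    | inr i =>
      have hi : i < 10 := by simpa [pvOkT] using hT _ (List.mem_cons_self ..)
      by_cases hik : i < k
      · have hd := pvF_digit i hi
        have h' : qc :: q' <+: pvD i :: pvStr k T' := by simpa [pvRend, hik] using h
        rw [List.cons_prefix_cons] at h'
        rw [h'.1] at hqc; simp [hd] at hqc
      · have h' : qc :: q' <+: pvW i ++ pvStr k T' := by simpa [pvRend, hik] using h
        by_cases hlen : (qc :: q').length ≤ (pvW i).length
        · exact (hw i hi).1 hlen (pv_prefix_left h' hlen)
        · exact (hw i hi).2 (by omega) (pv_prefix_swap h' (by omega))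

theorem pv_no_cross (k i : Nat) (hk : k < 10) (hi : i < 10) (hne : i ≠ k) (j : Nat)
    (hj : j < (pvW i).length) (T : List (Char ⊕ Nat)) (hT : ∀ t ∈ T, pvOkT t) :
    ¬ (pvW k).isPrefixOf ((pvW i).drop j ++ pvStr k T) := by
  rw [List.isPrefixOf_iff_prefix]
  intro h
  set p := (pvW i).drop j with hp
  by_cases hlen : (pvW k).length ≤ p.length
  · have := pv_prefix_left h hlen
    have hni := pvF_noinf k hk i hi hne j hj
    rw [List.isPrefixOf_iff_prefix] at hni
    exact hni this
  · have hpw : p <+: pvW k := pv_prefix_swap h (by omega)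
    have hpb : ((pvW i).drop j).isPrefixOf (pvW k) = true := by
      rw [List.isPrefixOf_iff_prefix]; exact hpw
    have hq1 := pvF_q1 k hk i hi hne j hj hpb
    have hq2 := pvF_q2 k hk i hi hne j hj hpb
    have hq3 := fun m hm hl hc => pvF_q3 k i j m hk hi hj hm hne hpb hl hc
    have hq4 := fun m hm hl hc => pvF_q4 k i j m hk hi hj hm hne hpb hl hc
    set q := (pvW k).drop p.length with hqdef
    have hsplit : pvW k = p ++ q := by
      rw [hqdef]
      conv_lhs => rw [← List.take_append_drop p.length (pvW k)]
      congr 1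
      exact (List.prefix_iff_eq_take.mp hpw).symm
    have hqX : q <+: pvStr k T := by
      rw [hsplit] at h
      exact (List.prefix_append_right_inj p).mp (by simpa [List.append_assoc] using h)
    exact pv_no_q_prefix q hq1 hq2
      (fun m hm => ⟨fun hl hc => hq3 m hm hl (by rw [List.isPrefixOf_iff_prefix]; exact hc),
                    fun hl hc => hq4 m hm hl (by rw [List.isPrefixOf_iff_prefix]; exact hc)⟩)
      k T hT hqX

-- pvRep consumes a block that the pattern nowhere matches into, verbatim

theorem pv_word_ne_nil (k : Nat) (hk : k < 10) : pvW k ≠ [] := by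
  have := pvF_len k hk; intro h; rw [h] at this; simp at this

theorem pv_word_cons (k : Nat) (hk : k < 10) : ∃ a w', pvW k = a :: w' := by
  cases hw : pvW k with
  | nil => exact absurd hw (pv_word_ne_nil k hk)
  | cons a w' => exact ⟨a, w', rfl⟩

theorem pvF_headD : ∀ i < 10, ((pvW i).headD 'x').isDigit = false := by decide

theorem pv_word_not_prefix_digit (k : Nat) (hk : k < 10) (c : Char) (hc : c.isDigit = true)
    (X : List Char) : ¬ (pvW k).isPrefixOf (c :: X) = true := by
  intro h
  rw [List.isPrefixOf_iff_prefix] at h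
  obtain ⟨a, w', hw⟩ := pv_word_cons k hk
  rw [hw, List.cons_prefix_cons] at h
  have hh := pvF_headD k hk
  rw [hw] at hh
  simp [h.1] at hh
  rw [hc] at hh
  simp at hh

theorem pv_step_rep (k : Nat) (hk : k < 10) : ∀ (T : List (Char ⊕ Nat)), (∀ t ∈ T, pvOkT t) →
    pvRep (pvW k) [pvD k] (pvStr k T) = pvStr (k + 1) T := by
  intro T
  induction T with
  | nil => intro _; simp [pvStr, pvRep]
  | cons t T' ih =>
    intro hT
    have hT' : ∀ t ∈ T', pvOkT t := fun t ht => hT t (List.mem_cons_of_mem _ ht)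
    have ih' := ih hT'
    have hstr : ∀ m, pvStr m (t :: T') = pvRend m t ++ pvStr m T' := by intro m; simp [pvStr]
    rw [hstr, hstr]
    cases t with
    | inl c =>
      have hc : c.isDigit = true := by simpa [pvOkT] using hT _ (List.mem_cons_self ..)
      have hnp : ¬ (pvW k).isPrefixOf (c :: pvStr k T') = true := pv_word_not_prefix_digit k hk c hc _
      rw [pvRend, pvRend]
      show pvRep (pvW k) [pvD k] (c :: pvStr k T') = [c] ++ pvStr (k+1) T'
      rw [pvRep, if_neg (by simp [hnp]), ih']
      simp
    | inr i =>
      have hi : i < 10 := by simpa [pvOkT] using hT _ (List.mem_cons_self ..)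
      rcases Nat.lt_trichotomy i k with hik | hik | hik
      · have hd : (pvD i).isDigit = true := pvF_digit i hi
        have hnp := pv_word_not_prefix_digit k hk (pvD i) hd (pvStr k T')
        rw [pvRend, pvRend, if_pos hik, if_pos (by omega)]
        show pvRep (pvW k) [pvD k] (pvD i :: pvStr k T') = [pvD i] ++ pvStr (k+1) T'
        rw [pvRep, if_neg (by simp [hnp]), ih']
        simp
      · subst hik
        rw [pvRend, pvRend, if_neg (by omega), if_pos (by omega)]
        obtain ⟨a, w', hw⟩ := pv_word_cons i hi
        rw [hw, List.cons_append, pvRep,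
            if_pos ⟨by simp, by rw [List.isPrefixOf_iff_prefix, ← List.cons_append]; exact List.prefix_append _ _⟩]
        rw [← List.cons_append, ← hw, List.drop_left, ih']
      · rw [pvRend, pvRend, if_neg (by omega), if_neg (by omega)]
        rw [pv_rep_peel _ _ _ _ (fun j hj => by
          simpa using pv_no_cross k i hk hi (by omega) j hj T' hT')]
        rw [ih']

theorem pv_chain (T : List (Char ⊕ Nat)) (hT : ∀ t ∈ T, pvOkT t) :
    pvItemsB.foldl (fun t p => PySem.Chars.replace t p.1 p.2) (pvStr 0 T) = pvStr 10 T := by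
  simp only [pvItemsB, List.foldl_cons, List.foldl_nil]
  rw [show (['z','e','r','o']:List Char) = pvW 0 from rfl, show (['0']:List Char) = [pvD 0] from rfl]
  rw [show (['o','n','e']:List Char) = pvW 1 from rfl, show (['1']:List Char) = [pvD 1] from rfl]
  rw [show (['t','w','o']:List Char) = pvW 2 from rfl, show (['2']:List Char) = [pvD 2] from rfl]
  rw [show (['t','h','r','e','e']:List Char) = pvW 3 from rfl, show (['3']:List Char) = [pvD 3] from rfl]
  rw [show (['f','o','u','r']:List Char) = pvW 4 from rfl, show (['4']:List Char) = [pvD 4] from rfl]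
  rw [show (['f','i','v','e']:List Char) = pvW 5 from rfl, show (['5']:List Char) = [pvD 5] from rfl]
  rw [show (['s','i','x']:List Char) = pvW 6 from rfl, show (['6']:List Char) = [pvD 6] from rfl]
  rw [show (['s','e','v','e','n']:List Char) = pvW 7 from rfl, show (['7']:List Char) = [pvD 7] from rfl]
  rw [show (['e','i','g','h','t']:List Char) = pvW 8 from rfl, show (['8']:List Char) = [pvD 8] from rfl]
  rw [show (['n','i','n','e']:List Char) = pvW 9 from rfl, show (['9']:List Char) = [pvD 9] from rfl]
  have step : ∀ k, k < 10 → ∀ s, s = pvStr k T →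
      PySem.Chars.replace s (pvW k) [pvD k] = pvStr (k+1) T := by
    intro k hk s hs
    rw [hs, pv_replace_eq_rep _ _ _ (pv_word_ne_nil k hk)]
    exact pv_step_rep k hk T hT
  rw [step 0 (by omega) _ rfl, step 1 (by omega) _ rfl, step 2 (by omega) _ rfl,
      step 3 (by omega) _ rfl, step 4 (by omega) _ rfl, step 5 (by omega) _ rfl,
      step 6 (by omega) _ rfl, step 7 (by omega) _ rfl, step 8 (by omega) _ rfl,
      step 9 (by omega) _ rfl]

-- ===== A-side =====
theorem pv_contains_digit (c : Char) : pvNumList.contains c = c.isDigit := by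
  cases hd : c.isDigit with
  | true =>
    simp only [Char.isDigit, Bool.and_eq_true, decide_eq_true_eq] at hd
    have h1 : 48 ≤ c.toNat := Nat.succ_le_of_lt hd.1
    have h2 : c.toNat ≤ 57 := by
      have := hd.2
      simpa [UInt32.le_iff_toNat_le] using this
    have hc : c = Char.ofNat c.toNat := (Char.ofNat_toNat c).symm
    interval_cases h : c.toNat <;> rw [hc] <;> decide
  | false =>
    by_contra hcon
    have hmem : c ∈ pvNumList := by
      have : pvNumList.contains c = true := by
        cases hcc : pvNumList.contains c
        · rw [hcc] at hcon; simp at hcon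
        · rfl
      exact List.contains_iff_mem.mp this
    fin_cases hmem <;> simp_all

theorem pvF_Akey : ∀ i < 10, pvNumDict.get? (pvW i) = some [pvD i] := by decide

set_option maxRecDepth 8192 in
theorem pvF_Aprefix : ∀ i < 10, ∀ m < (pvW i).length, 1 ≤ m →
    (pvNumDict.get? ((pvW i).take m)).isSome = false := by decide

set_option maxRecDepth 8192 in
theorem pvF_Aletters : ∀ i < 10, ((pvW i).all (fun c => !pvNumList.contains c)) = true := by decide

theorem pv_slice_at (u z : List Char) (j : Nat) :
    PySem.List.slice (u ++ z) (some (u.length : Int)) (some ((u.length + j : Nat) : Int)) = z.take j := by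
  rw [PySem.List.slice_natCast, List.drop_left]
  congr 1
  omega

theorem pv_inner_word (i : Nat) (hi : i < 10) (u X : List Char) :
    ∀ m j, j + m = (pvW i).length → 0 < m →
      pvInnerA (u ++ (pvW i ++ X)) u.length (u.length + j) = some (u.length + (pvW i).length) := by
  intro m
  induction m with
  | zero => intro j hj hm; omega
  | succ m' ih =>
    intro j hj _
    have hjlt : j < (pvW i).length := by omega
    have hblt : u.length + j < (u ++ (pvW i ++ X)).length := by
      simp [List.length_append]; omega
    rw [pvInnerA, dif_pos hblt]
    have hel : (u ++ (pvW i ++ X))[u.length + j]'hblt = (pvW i)[j]'hjlt := by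
      rw [List.getElem_append_right (by omega)]
      rw [List.getElem_append_left (by omega)]
      congr 1
      omega
    have hletters := pvF_Aletters i hi
    rw [List.all_eq_true] at hletters
    have hcont : pvNumList.contains ((pvW i)[j]'hjlt) = false := by
      have := hletters _ (List.getElem_mem hjlt)
      simpa using this
    rw [hel, if_neg (by intro hmem; rw [List.contains_iff_mem] at hmem; simp [hmem] at hcont)]
    have hsl : PySem.List.slice (u ++ (pvW i ++ X)) (some (u.length : Int))
        (some ((u.length + j + 1 : Nat) : Int)) = (pvW i).take (j + 1) := by
      have := pv_slice_at u (pvW i ++ X) (j + 1)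
      rw [show u.length + j + 1 = u.length + (j + 1) by omega, this]
      exact List.take_append_of_le_length (by omega)
    by_cases hm0 : m' = 0
    · subst hm0
      have hfull : (pvW i).take (j + 1) = pvW i := List.take_of_length_le (by omega)
      rw [if_pos (by rw [hsl, hfull, pvF_Akey i hi]; rfl)]
      congr 1
      omega
    · rw [if_neg (by rw [hsl, pvF_Aprefix i hi (j + 1) (by omega) (by omega)]; simp)]
      rw [show u.length + j + 1 = u.length + (j + 1) by omega]
      exact ih (j + 1) (by omega) (by omega)

theorem pv_outer_ok : ∀ (T : List (Char ⊕ Nat)), (∀ t ∈ T, pvOkT t) →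
    ∀ (u ans : List Char),
      pvOuterA (u ++ pvStr 0 T) u.length ans = some (ans ++ pvStr 10 T) := by
  intro T
  induction T with
  | nil =>
    intro _ u ans
    rw [pvOuterA, dif_neg (by simp [pvStr])]
    simp [pvStr]
  | cons t T' ih =>
    intro hT u ans
    have hT' : ∀ t ∈ T', pvOkT t := fun t ht => hT t (List.mem_cons_of_mem _ ht)
    have ih' := ih hT'
    cases t with
    | inl c =>
      have hc : c.isDigit = true := by simpa [pvOkT] using hT _ (List.mem_cons_self ..)
      have hstr0 : pvStr 0 (Sum.inl c :: T') = [c] ++ pvStr 0 T' := by simp [pvStr, pvRend]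
      rw [hstr0]
      have hlt : u.length < (u ++ ([c] ++ pvStr 0 T')).length := by simp
      have hel : (u ++ ([c] ++ pvStr 0 T'))[u.length]'hlt = c := by
        rw [List.getElem_append_right (by omega)]
        simp
      have hinner : pvInnerA (u ++ ([c] ++ pvStr 0 T')) u.length u.length = some u.length := by
        rw [pvInnerA, dif_pos hlt]
        rw [hel, if_pos (by rw [pv_contains_digit, hc])]
      rw [pvOuterA, dif_pos hlt, hinner]
      simp only [Nat.sub_self]
      rw [if_neg (by omega)]
      rw [hel]
      have : u ++ ([c] ++ pvStr 0 T') = (u ++ [c]) ++ pvStr 0 T' := by simp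
      rw [show u.length + 1 = (u ++ [c]).length by simp, this, ih' (u ++ [c]) (ans ++ [c])]
      simp [pvStr, pvRend]
    | inr i =>
      have hi : i < 10 := by simpa [pvOkT] using hT _ (List.mem_cons_self ..)
      have hw3 := pvF_len i hi
      have hstr0 : pvStr 0 (Sum.inr i :: T') = pvW i ++ pvStr 0 T' := by
        simp [pvStr, pvRend]
      rw [hstr0]
      have hlt : u.length < (u ++ (pvW i ++ pvStr 0 T')).length := by simp; omega
      have hinner := pv_inner_word i hi u (pvStr 0 T') (pvW i).length 0 (by omega) (by omega)
      rw [show u.length + 0 = u.length by omega] at hinner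
      rw [pvOuterA, dif_pos hlt, hinner]
      simp only [Nat.add_sub_cancel_left]
      rw [if_pos (by omega)]
      have hsl : PySem.List.slice (u ++ (pvW i ++ pvStr 0 T')) (some (u.length : Int))
          (some ((u.length + (pvW i).length : Nat) : Int)) = pvW i := by
        rw [pv_slice_at u (pvW i ++ pvStr 0 T') (pvW i).length]
        exact List.take_left
      rw [hsl, pvF_Akey i hi]
      have hassoc : u ++ (pvW i ++ pvStr 0 T') = (u ++ pvW i) ++ pvStr 0 T' := by simp
      rw [show u.length + (pvW i).length = (u ++ pvW i).length by simp, hassoc]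
      simp only []
      show pvOuterA (u ++ pvW i ++ pvStr 0 T') (u ++ pvW i).length (ans ++ [pvD i]) =
        some (ans ++ pvStr 10 (Sum.inr i :: T'))
      rw [ih' (u ++ pvW i) (ans ++ [pvD i])]
      simp [pvStr, pvRend, hi]

-- Pre_ soundness: a reachable end position yields a tokenization
theorem pv_take_prefix (cs w : List Char) (i : Nat) (h : w <+: cs.drop i) :
    cs.take (i + w.length) = cs.take i ++ w := by
  obtain ⟨r, hr⟩ := h
  by_cases hi : i ≤ cs.length
  · have hlen : (cs.take i).length = i := by simp [List.length_take]; omega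
    conv_lhs => rw [← List.take_append_drop i cs, ← hr]
    rw [List.take_append]
    congr 1
    · exact List.take_of_length_le (by omega)
    · rw [List.take_append]
      have h1 : i + w.length - (List.take i cs).length - w.length = 0 := by
        simp [List.length_take]; omega
      have h2 : i + w.length - (List.take i cs).length = w.length := by
        simp [List.length_take]; omega
      rw [h1, h2]
      simp
  · have : cs.drop i = [] := by
      apply List.drop_eq_nil_of_le; omega
    rw [this] at hr
    have : w = [] := by
      cases w with | nil => rfl | cons a b => simp at hr
    subst this
    simp

theorem pvF_widx : ∀ w ∈ pvWordsP, ∃ iw, iw < 10 ∧ pvW iw = w := by decide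

theorem pv_reach_sound (cs : List Char) :
    ∀ j ∈ pvReach cs, ∃ T, (∀ t ∈ T, pvOkT t) ∧ pvStr 0 T = cs.take j := by
  have main : ∀ (l : List Nat) (acc : List Nat),
      (∀ j ∈ acc, ∃ T, (∀ t ∈ T, pvOkT t) ∧ pvStr 0 T = cs.take j) →
      ∀ j ∈ l.foldl (fun acc i => if acc.contains i then acc ++ pvStepsAt cs i else acc) acc,
        ∃ T, (∀ t ∈ T, pvOkT t) ∧ pvStr 0 T = cs.take j := by
    intro l
    induction l with
    | nil => intro acc hacc j hj; exact hacc j (by simpa using hj)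
    | cons i l' ih =>
      intro acc hacc j hj
      rw [List.foldl_cons] at hj
      refine ih _ ?_ j hj
      intro j' hj'
      by_cases hc : acc.contains i
      · rw [if_pos hc] at hj'
        rcases List.mem_append.mp hj' with hmem | hmem
        · exact hacc j' hmem
        · obtain ⟨Ti, hTi, hTis⟩ := hacc i (List.contains_iff_mem.mp hc)
          rw [pvStepsAt] at hmem
          rcases List.mem_append.mp hmem with hw | hd
          · obtain ⟨w, hwf, hwj⟩ := List.mem_map.mp hw
            have hwmem := List.mem_filter.mp hwf
            obtain ⟨iw, hiw, hiweq⟩ := pvF_widx w hwmem.1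
            refine ⟨Ti ++ [.inr iw], ?_, ?_⟩
            · intro t ht
              rcases List.mem_append.mp ht with h1 | h1
              · exact hTi t h1
              · simp at h1; subst h1; simpa [pvOkT] using hiw
            · rw [← hwj, pv_take_prefix cs w i (List.isPrefixOf_iff_prefix.mp hwmem.2)]
              simp [pvStr, ← hTis, pvRend, hiweq]
          · match hdrop : cs.drop i with
            | [] => rw [hdrop] at hd; simp at hd
            | c :: rest =>
              rw [hdrop] at hd
              have hd' : j' ∈ (if c.isDigit then [i + 1] else []) := hd
              by_cases hcd : c.isDigit
              · rw [if_pos hcd] at hd'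
                simp at hd'; subst hd'
                refine ⟨Ti ++ [.inl c], ?_, ?_⟩
                · intro t ht
                  rcases List.mem_append.mp ht with h1 | h1
                  · exact hTi t h1
                  · simp at h1; subst h1; simpa [pvOkT] using hcd
                · have : [c] <+: cs.drop i := by rw [hdrop]; exact ⟨rest, rfl⟩
                  have := pv_take_prefix cs [c] i this
                  simp at this
                  rw [this]
                  simp [pvStr, ← hTis, pvRend]
              · rw [if_neg hcd] at hd'; simp at hd'
      · rw [if_neg hc] at hj'; exact hacc j' hj'
  intro j hj
  refine main (List.range cs.length) [0] ?_ j hj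
  intro j' hj'
  simp at hj'; subst hj'
  exact ⟨[], by simp, by simp [pvStr]⟩

-- ===== VERDICT (by name: the statement is the Claim_ definition above) =====
theorem solution_spec : Claim_equal_solution := by
  intro s _ hpre
  unfold Spec_solution
  obtain ⟨hne, hreach⟩ := hpre
  obtain ⟨T, hT, hTs⟩ := pv_reach_sound s.toList s.toList.length
    (by simpa [List.contains_iff_mem] using hreach)
  rw [List.take_length] at hTs
  have hA : pvOuterA s.toList 0 [] = some (pvStr 10 T) := by
    have := pv_outer_ok T hT [] []
    simpa [hTs] using this
  have hB : pvItemsB.foldl (fun t p => PySem.Chars.replace t p.1 p.2) s.toList = pvStr 10 T := by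
    rw [← hTs]; exact pv_chain T hT
  simp [solution, solution_alt, hA, hB]
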